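-- pv_equiv track=rewrite | github.com/wcyno23/FlexRAG | main_likelihood/llmlingua_compressor.py | get_token_idx
-- ===== SOURCE A (Python) =====
-- def get_token_idx(tensor1, tensor2):
--     index_list = []
--     begin = 0
--     for token_id in tensor2:
--         idx_temp = 0
--         for idx, original_id in enumerate(tensor1):
--             if original_id == token_id:
--                 index_list.append(idx + begin)
--                 idx_temp = idx + 1
--                 begin += idx_temp
--                 break
--
--         tensor1 = tensor1[idx_temp:]
--
--     return index_list
-- ===== SOURCE B (Python) =====
-- def _first_geq(a, x):
--     # index of the first element of the sorted list a that is >= x (bisect_left)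
--     lo, hi = 0, len(a)
--     while lo < hi:
--         mid = (lo + hi) // 2
--         if a[mid] < x:
--             lo = mid + 1
--         else:
--             hi = mid
--     return lo
--
--
-- def get_token_idx(tensor1, tensor2):
--     # index every value of tensor1 once: value -> increasing list of positions
--     pos = {}
--     for i, v in enumerate(tensor1):
--         pos.setdefault(v, []).append(i)
--     index_list = []
--     begin = 0
--     for token_id in tensor2:
--         lst = pos.get(token_id, [])
--         j = _first_geq(lst, begin)
--         if j < len(lst):
--             idx = lst[j]
--             index_list.append(idx)
--             begin = idx + 1
--     return index_list
-- ===== Notes on version B (the rewrite author's own statement) =====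
-- stated objective: faster
-- what changed: Replaces the per-token linear rescan of the (repeatedly sliced) tensor1 by a value->sorted-positions index built once plus a hand-written binary search for the first position >= begin.
import Mathlib
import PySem

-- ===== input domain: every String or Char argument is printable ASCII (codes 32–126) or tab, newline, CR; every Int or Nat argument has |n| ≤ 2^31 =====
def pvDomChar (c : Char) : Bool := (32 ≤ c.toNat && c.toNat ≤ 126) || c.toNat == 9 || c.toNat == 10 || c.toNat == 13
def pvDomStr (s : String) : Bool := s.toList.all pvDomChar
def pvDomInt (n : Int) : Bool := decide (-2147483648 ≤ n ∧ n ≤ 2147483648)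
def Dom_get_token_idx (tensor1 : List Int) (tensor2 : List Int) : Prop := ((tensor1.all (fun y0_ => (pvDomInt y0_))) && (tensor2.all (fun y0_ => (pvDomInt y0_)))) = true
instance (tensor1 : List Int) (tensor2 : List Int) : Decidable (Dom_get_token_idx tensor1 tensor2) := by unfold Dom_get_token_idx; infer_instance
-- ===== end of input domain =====

-- B replaces A's per-token rescan of the sliced tensor1 by a value→positions index built
-- once plus a binary search for the first position ≥ begin (objective: faster).

-- ===== PORT A =====
-- inner 'for idx, original_id in enumerate(tensor1): if original_id == token_id: … break':
-- first index of t in the list, none if absent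
def pvFindA : List Int → Int → Option Nat
  | [], _ => none
  | x :: xs, t => if x = t then some 0 else (pvFindA xs t).map (· + 1)

-- outer 'for token_id in tensor2' loop; state: current tensor1, begin, index_list
def pvGoA : List Int → List Int → Nat → List Int → List Int
  | _, [], _, acc => acc
  | t1, tok :: rest, b, acc =>
    match pvFindA t1 tok with
    | some idx => pvGoA (t1.drop (idx + 1)) rest (b + (idx + 1)) (acc ++ [((idx + b : Nat) : Int)])
    | none => pvGoA (t1.drop 0) rest b acc

def get_token_idx (tensor1 : List Int) (tensor2 : List Int) : List Int :=
  pvGoA tensor1 tensor2 0 []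

-- ===== PORT B =====
-- 'pos.setdefault(v, []).append(i)' for each (i, v) in enumerate(tensor1)
def pvStepB (d : PySem.Dict Int (List Int)) (p : Int × Int) : PySem.Dict Int (List Int) :=
  d.insert p.2 (d.getD p.2 [] ++ [p.1])

def pvBuildB (t1 : List Int) : PySem.Dict Int (List Int) :=
  (PySem.List.enumerate t1 0).foldl pvStepB PySem.Dict.empty

-- _first_geq: hand-written bisect_left loop
def pvBL (a : List Int) (x : Int) (lo hi : Nat) : Nat :=
  if h : lo < hi then
    if a.getD ((lo + hi) / 2) 0 < x then pvBL a x ((lo + hi) / 2 + 1) hi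
    else pvBL a x lo ((lo + hi) / 2)
  else lo
termination_by hi - lo
decreasing_by all_goals omega

-- 'for token_id in tensor2' loop of B; state: begin, index_list
def pvGoB (d : PySem.Dict Int (List Int)) : List Int → Int → List Int → List Int
  | [], _, out => out
  | tok :: rest, b, out =>
    let lst := d.getD tok []
    match lst[pvBL lst b 0 lst.length]? with   -- 'if j < len(lst): idx = lst[j]'
    | some idx => pvGoB d rest (idx + 1) (out ++ [idx])
    | none => pvGoB d rest b out

def get_token_idx_alt (tensor1 : List Int) (tensor2 : List Int) : List Int :=
  pvGoB (pvBuildB tensor1) tensor2 0 []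

-- ===== PRECONDITION & SPEC =====
def Spec_get_token_idx (tensor1 : List Int) (tensor2 : List Int) (out : List Int) : Prop := out = get_token_idx_alt tensor1 tensor2
instance (tensor1 : List Int) (tensor2 : List Int) (out : List Int) : Decidable (Spec_get_token_idx tensor1 tensor2 out) := by unfold Spec_get_token_idx; infer_instance

-- ===== CLAIM (what is proved, stated in full; the proofs are below) =====
def Claim_equal_get_token_idx : Prop := ∀ (tensor1 : List Int) (tensor2 : List Int), Dom_get_token_idx tensor1 tensor2 → Spec_get_token_idx tensor1 tensor2 (get_token_idx tensor1 tensor2)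

-- ===== LEMMAS AND PROOFS =====

-- positions (0-based) of t in the list, in increasing order
def pvOcc (t : Int) : List Int → List Nat
  | [] => []
  | x :: xs => if x = t then 0 :: (pvOcc t xs).map (· + 1) else (pvOcc t xs).map (· + 1)

theorem pvOcc_head (t : Int) (l : List Int) : (pvOcc t l).head? = pvFindA l t := by
  induction l with
  | nil => rfl
  | cons x xs ih =>
    simp only [pvOcc, pvFindA]
    by_cases h : x = t
    · simp [h]
    · simp [h, ← ih, List.head?_map]

theorem pvOcc_pairwise (t : Int) (l : List Int) : (pvOcc t l).Pairwise (· < ·) := by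
  induction l with
  | nil => simp [pvOcc]
  | cons x xs ih =>
    simp only [pvOcc]
    have hmap : ((pvOcc t xs).map (· + 1)).Pairwise (· < ·) :=
      List.Pairwise.map _ (by omega) ih
    by_cases h : x = t
    · simp only [if_pos h]
      refine List.pairwise_cons.mpr ⟨?_, hmap⟩
      intro y hy
      rcases List.mem_map.mp hy with ⟨z, _, rfl⟩
      omega
    · simp [h, hmap]

theorem pvFind_true (l : List Nat) : l.find? (fun _ => true) = l.head? := by
  cases l with
  | nil => rfl
  | cons x xs => rw [List.find?_cons_of_pos rfl]; rfl

theorem pvFind_shift (L : List Nat) (b : Nat) :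
    (L.map (· + 1)).find? (fun i => decide (b + 1 ≤ i)) = (L.find? (fun i => decide (b ≤ i))).map (· + 1) := by
  induction L with
  | nil => rfl
  | cons z L ih =>
    simp only [List.map_cons]
    by_cases h : b ≤ z
    · rw [List.find?_cons_of_pos (by simp; omega), List.find?_cons_of_pos (by simpa using h)]
      rfl
    · rw [List.find?_cons_of_neg (by simp; omega), List.find?_cons_of_neg (by simpa using h)]
      exact ih

theorem pvOcc_find (t : Int) : ∀ (b : Nat) (l : List Int),
    (pvOcc t l).find? (fun i => decide (b ≤ i)) = (pvFindA (l.drop b) t).map (· + b) := by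
  intro b
  induction b with
  | zero =>
    intro l
    have hp : (fun i : Nat => decide (0 ≤ i)) = fun _ => true := by funext i; simp
    rw [hp, pvFind_true, pvOcc_head, List.drop_zero]
    cases pvFindA l t <;> rfl
  | succ b ih =>
    intro l
    cases l with
    | nil => simp [pvOcc, pvFindA]
    | cons x xs =>
      have key : ((pvOcc t xs).map (· + 1)).find? (fun i => decide (b + 1 ≤ i))
          = (pvFindA (xs.drop b) t).map (· + (b + 1)) := by
        rw [pvFind_shift, ih xs, Option.map_map]
        congr 1
      simp only [pvOcc]
      by_cases h : x = t
      · rw [if_pos h]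
        rw [List.find?_cons_of_neg (by simp)]
        rw [List.drop_succ_cons]
        exact key
      · rw [if_neg h, List.drop_succ_cons]
        exact key

-- contents of the dict built by B
theorem pvBuild_aux (v : Int) : ∀ (l : List Int) (s : Int) (d : PySem.Dict Int (List Int)),
    ((PySem.List.enumerate l s).foldl pvStepB d).getD v [] = d.getD v [] ++ (pvOcc v l).map (fun i : Nat => (i : Int) + s) := by
  intro l
  induction l with
  | nil => intro s d; simp [PySem.List.enumerate_nil, pvOcc]
  | cons x xs ih =>
    intro s d
    have tail : ∀ s' : Int, ((pvOcc v xs).map (· + 1)).map (fun i : Nat => (i : Int) + s')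
        = (pvOcc v xs).map (fun i : Nat => (i : Int) + (s' + 1)) := by
      intro s'
      rw [List.map_map]
      apply List.map_congr_left
      intro i _
      simp only [Function.comp_apply]
      push_cast
      ring
    rw [PySem.List.enumerate_cons, List.foldl_cons]
    simp only [pvStepB]
    rw [ih]
    rw [PySem.Dict.getD_insert]
    simp only [pvOcc]
    by_cases h : x = v
    · rw [if_pos h.symm, if_pos h, List.map_cons, tail, List.append_assoc]
      simp [h]
    · rw [if_neg (fun hh => h hh.symm), if_neg h, tail]

theorem pvBuild_getD (t1 : List Int) (v : Int) :
    (pvBuildB t1).getD v [] = (pvOcc v t1).map (fun i : Nat => (i : Int)) := by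
  rw [pvBuildB, pvBuild_aux]
  have he : (PySem.Dict.empty : PySem.Dict Int (List Int)).getD v [] = [] := by simp
  rw [he, List.nil_append]
  apply List.map_congr_left
  intro i _
  simp

-- sorted lists: getD is monotone
theorem pvSorted_getD_le {a : List Int} (h : a.Pairwise (· < ·)) {i j : Nat}
    (hij : i ≤ j) (hj : j < a.length) : a.getD i 0 ≤ a.getD j 0 := by
  have hi : i < a.length := lt_of_le_of_lt hij hj
  rw [List.getD_eq_getElem?_getD, List.getD_eq_getElem?_getD,
      List.getElem?_eq_getElem hi, List.getElem?_eq_getElem hj]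
  rcases Nat.lt_or_ge i j with hlt | hge
  · exact le_of_lt ((List.pairwise_iff_getElem.mp h) i j hi hj hlt)
  · have : i = j := le_antisymm hij hge
    subst this; simp

-- invariant of the binary search
theorem pvBL_inv (a : List Int) (x : Int) (hs : a.Pairwise (· < ·)) :
    ∀ (n lo hi : Nat), hi - lo ≤ n → hi ≤ a.length → lo ≤ hi →
    (∀ i, i < lo → a.getD i 0 < x) → (∀ i, hi ≤ i → i < a.length → x ≤ a.getD i 0) →
    (∀ i, i < pvBL a x lo hi → a.getD i 0 < x) ∧
    (∀ i, pvBL a x lo hi ≤ i → i < a.length → x ≤ a.getD i 0) := by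
  intro n
  induction n with
  | zero =>
    intro lo hi hn hhi hlohi hlo hhi2
    have heq : lo = hi := by omega
    subst heq
    have hbl : pvBL a x lo lo = lo := by rw [pvBL]; simp
    rw [hbl]
    exact ⟨hlo, hhi2⟩
  | succ n ih =>
    intro lo hi hn hhi hlohi hlo hhi2
    by_cases h : lo < hi
    · rw [pvBL, dif_pos h]
      set mid := (lo + hi) / 2 with hmid
      have hmlt : mid < hi := by omega
      have hml : lo ≤ mid := by omega
      by_cases hc : a.getD mid 0 < x
      · rw [if_pos hc]
        refine ih (mid + 1) hi (by omega) hhi (by omega) ?_ hhi2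
        intro i hi2
        exact lt_of_le_of_lt (pvSorted_getD_le hs (by omega) (by omega)) hc
      · rw [if_neg hc]
        refine ih lo mid (by omega) (by omega) hml hlo ?_
        intro i hmi hil
        exact le_trans (le_of_not_gt hc) (pvSorted_getD_le hs hmi hil)
    · have heq : lo = hi := by omega
      subst heq
      have hbl : pvBL a x lo lo = lo := by rw [pvBL]; simp
      rw [hbl]
      exact ⟨hlo, hhi2⟩

-- find? returns the element at the first index where the predicate holds
theorem pvFind_at (p : Int → Bool) :
    ∀ (a : List Int) (j : Nat),
    (∀ i, i < j → i < a.length → p (a.getD i 0) = false) →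
    (j < a.length → p (a.getD j 0) = true) →
    a.find? p = a[j]? := by
  intro a
  induction a with
  | nil => intro j _ _; simp
  | cons x xs ih =>
    intro j hbefore hat
    cases j with
    | zero =>
      have hx : p x = true := by simpa using hat (by simp)
      rw [List.find?_cons_of_pos hx]
      rfl
    | succ k =>
      have hx : ¬ p x = true := by simpa using hbefore 0 (Nat.succ_pos k) (by simp)
      rw [List.find?_cons_of_neg hx]
      rw [ih k (fun i h1 h2 => by simpa using hbefore (i + 1) (by omega) (by simpa using h2))
        (fun h => by simpa using hat (by simpa using h))]
      simp

-- the per-token step of B computes exactly A's inner search (as an absolute index)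
theorem pvKey (t1 : List Int) (tok : Int) (b : Nat) :
    (let lst := (pvBuildB t1).getD tok [];
      lst[pvBL lst (b : Int) 0 lst.length]?)
    = (pvFindA (t1.drop b) tok).map (fun idx => ((idx + b : Nat) : Int)) := by
  simp only
  set lst := (pvBuildB t1).getD tok [] with hlst
  have hlsteq : lst = (pvOcc tok t1).map (fun i : Nat => (i : Int)) := pvBuild_getD t1 tok
  have hsorted : lst.Pairwise (· < ·) := by
    rw [hlsteq]
    exact List.Pairwise.map _ (fun {a b} h => by exact_mod_cast h) (pvOcc_pairwise tok t1)
  obtain ⟨h1, h2⟩ := pvBL_inv lst (b : Int) hsorted lst.length 0 lst.length (by omega) le_rfl (Nat.zero_le _)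
      (by omega) (fun i h hl => absurd (lt_of_le_of_lt h hl) (lt_irrefl _))
  have hfind : lst.find? (fun e => decide ((b : Int) ≤ e)) = lst[pvBL lst (b : Int) 0 lst.length]? := by
    apply pvFind_at
    · intro i hij hil
      have := h1 i hij
      simp only [decide_eq_false_iff_not]
      omega
    · intro hj
      have := h2 _ le_rfl hj
      simpa using this
  rw [← hfind, hlsteq, List.find?_map]
  have hpred : ((fun e : Int => decide ((b : Int) ≤ e)) ∘ (fun i : Nat => (i : Int))) = (fun i : Nat => decide (b ≤ i)) := by
    funext i
    simp [Function.comp]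
  rw [hpred, pvOcc_find, Option.map_map]
  congr 1

theorem pvMain (t1 : List Int) : ∀ (t2 : List Int) (b : Nat) (acc : List Int),
    pvGoA (t1.drop b) t2 b acc = pvGoB (pvBuildB t1) t2 (b : Int) acc := by
  intro t2
  induction t2 with
  | nil => intro b acc; rfl
  | cons tok rest ih =>
    intro b acc
    have hk := pvKey t1 tok b
    simp only at hk
    simp only [pvGoA, pvGoB, hk]
    cases hfa : pvFindA (t1.drop b) tok with
    | none =>
      simp only [Option.map_none, List.drop_zero]
      exact ih b acc
    | some idx =>
      simp only [Option.map_some]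
      rw [List.drop_drop]
      have h2 : ((idx + b : Nat) : Int) + 1 = ((b + (idx + 1) : Nat) : Int) := by push_cast; ring
      rw [h2]
      exact ih (b + (idx + 1)) (acc ++ [((idx + b : Nat) : Int)])

-- ===== VERDICT (by name: the statement is the Claim_ definition above) =====
theorem get_token_idx_spec : Claim_equal_get_token_idx := by
  intro t1 t2 _
  show get_token_idx t1 t2 = get_token_idx_alt t1 t2
  simpa [get_token_idx, get_token_idx_alt] using pvMain t1 t2 0 []
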